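-- pv_equiv track=rewrite | github.com/lukehowlett97/residual_modelling_dashboard | dashboard/data_loader.py | get_prns_by_system
-- ===== SOURCE A (Python) =====
-- from collections import defaultdict
--
-- def get_prns_by_system(files_info):
--     prns_by_system = defaultdict(set)
--     for f in files_info:
--         system = f['system']
--         prn = f['prn']
--         prns_by_system[system].add(prn)
--     # Convert sets to sorted lists
--     prns_by_system = {s: sorted(list(prns)) for s, prns in prns_by_system.items()}
--     return prns_by_system
-- ===== SOURCE B (Python) =====
-- def _insort_unique(lst, x):
--     i = 0
--     while i < len(lst) and lst[i] < x:
--         i += 1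
--     if i == len(lst) or lst[i] != x:
--         lst.insert(i, x)
--
-- def get_prns_by_system(files_info):
--     result = {}
--     for f in files_info:
--         _insort_unique(result.setdefault(f['system'], []), f['prn'])
--     return result
-- ===== Notes on version B (the rewrite author's own statement) =====
-- stated objective: alternative
-- what changed: B replaces A's defaultdict-of-sets accumulation plus a final per-bucket sorting pass with a single pass that keeps each system's deduplicated prn list in sorted order via ordered insertion (setdefault + in-place insort).
import Mathlib
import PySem

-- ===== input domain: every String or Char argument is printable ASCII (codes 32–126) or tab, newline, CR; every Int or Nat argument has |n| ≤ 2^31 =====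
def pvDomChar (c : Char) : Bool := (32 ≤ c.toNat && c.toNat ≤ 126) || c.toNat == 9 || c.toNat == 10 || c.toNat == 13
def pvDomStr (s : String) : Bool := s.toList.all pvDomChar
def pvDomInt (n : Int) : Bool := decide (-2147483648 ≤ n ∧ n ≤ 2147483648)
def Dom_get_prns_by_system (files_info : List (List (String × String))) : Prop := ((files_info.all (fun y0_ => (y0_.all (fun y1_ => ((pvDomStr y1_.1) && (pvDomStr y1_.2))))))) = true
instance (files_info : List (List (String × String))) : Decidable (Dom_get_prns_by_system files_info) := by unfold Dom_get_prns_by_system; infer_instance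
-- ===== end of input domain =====

-- B replaces A's per-system set accumulation followed by a sorting pass with a single pass
-- that maintains each system's deduplicated prn list in sorted order by ordered insertion.

-- f['k'] (first-match association-list lookup); the .getD "" default is reached only
-- outside Pre_get_prns_by_system, where the Python raises KeyError.
def dGet : List (String × String) → String → String
  | [], _ => ""
  | (k', v) :: rest, k => if k' = k then v else dGet rest k

-- ===== PORT A =====
def get_prns_by_system (files_info : List (List (String × String))) : List (String × List String) :=
  let prns_by_system : PySem.Dict String (PySem.Set String) :=
    files_info.foldl (fun d f =>
      let system := dGet f "system"
      let prn := dGet f "prn"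
      d.insert system (PySem.Set.add (d.getD system PySem.Set.empty) prn)) PySem.Dict.empty
  prns_by_system.items.map (fun p => (p.1, PySem.List.sorted p.2 (fun x => x) false))

-- ===== PORT B =====
-- the while-loop of _insort_unique as structural recursion: walk past smaller elements,
-- then insert unless the element is already there
def insortUnique (x : String) : List String → List String
  | [] => [x]
  | y :: ys =>
    if y < x then y :: insortUnique x ys
    else if y ≠ x then x :: y :: ys
    else y :: ys

def get_prns_by_system_alt (files_info : List (List (String × String))) : List (String × List String) :=
  (files_info.foldl (fun d f =>
    d.insert (dGet f "system")
      (insortUnique (dGet f "prn") (d.getD (dGet f "system") [])))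
    (PySem.Dict.empty : PySem.Dict String (List String))).items

-- ===== PRECONDITION & SPEC =====
-- A raises KeyError when a record lacks the 'system' or 'prn' key; exactly those inputs are excluded.
def Pre_get_prns_by_system (files_info : List (List (String × String))) : Prop :=
  ∀ f ∈ files_info, (∃ p ∈ f, p.1 = "system") ∧ (∃ p ∈ f, p.1 = "prn")
instance (files_info : List (List (String × String))) : Decidable (Pre_get_prns_by_system files_info) := by unfold Pre_get_prns_by_system; infer_instance

def pvWitness_get_prns_by_system : (List (List (String × String))) :=
  [[("system", "GPS"), ("prn", "07")], [("system", "GPS"), ("prn", "02")]]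

def Spec_get_prns_by_system (files_info : List (List (String × String))) (out : List (String × List String)) : Prop := out = get_prns_by_system_alt files_info
instance (files_info : List (List (String × String))) (out : List (String × List String)) : Decidable (Spec_get_prns_by_system files_info out) := by unfold Spec_get_prns_by_system; infer_instance

-- ===== CLAIM (what is proved, stated in full; the proofs are below) =====
def Claim_equal_get_prns_by_system : Prop := ∀ (files_info : List (List (String × String))), Dom_get_prns_by_system files_info → Pre_get_prns_by_system files_info → Spec_get_prns_by_system files_info (get_prns_by_system files_info)

-- ===== LEMMAS AND PROOFS =====

-- abbreviation used only in the proofs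
def srt (l : List String) : List String := PySem.List.sorted l (fun x => x) false

lemma insortUnique_of_mem {x : String} : ∀ {l : List String},
    l.Pairwise (· < ·) → x ∈ l → insortUnique x l = l := by
  intro l
  induction l with
  | nil => intro _ h; cases h
  | cons y ys ih =>
    intro hp hm
    rcases List.mem_cons.1 hm with rfl | hm
    · simp [insortUnique]
    · have hyx : y < x := (List.pairwise_cons.1 hp).1 x hm
      simp only [insortUnique, if_pos hyx]
      rw [ih (List.pairwise_cons.1 hp).2 hm]

lemma insortUnique_perm_of_not_mem {x : String} : ∀ {l : List String},
    x ∉ l → (insortUnique x l).Perm (x :: l) := by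
  intro l
  induction l with
  | nil => intro _; simp [insortUnique]
  | cons y ys ih =>
    intro hnm
    have hxy : x ≠ y := fun h => hnm (h ▸ List.mem_cons_self)
    have hx' : x ∉ ys := fun h => hnm (List.mem_cons_of_mem _ h)
    by_cases hlt : y < x
    · simp only [insortUnique, if_pos hlt]
      exact ((ih hx').cons y).trans (List.Perm.swap x y ys)
    · simp only [insortUnique]
      rw [if_neg hlt, if_pos (Ne.symm hxy)]

lemma insortUnique_pairwise_of_not_mem {x : String} : ∀ {l : List String},
    l.Pairwise (· < ·) → x ∉ l → (insortUnique x l).Pairwise (· < ·) := by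
  intro l
  induction l with
  | nil => intro _ _; simp [insortUnique]
  | cons y ys ih =>
    intro hp hnm
    have hxy : x ≠ y := fun h => hnm (h ▸ List.mem_cons_self)
    have hx' : x ∉ ys := fun h => hnm (List.mem_cons_of_mem _ h)
    rcases List.pairwise_cons.1 hp with ⟨hy, hys⟩
    by_cases hlt : y < x
    · simp only [insortUnique, if_pos hlt]
      refine List.pairwise_cons.2 ⟨?_, ih hys hx'⟩
      intro a ha
      rcases List.mem_cons.1 ((insortUnique_perm_of_not_mem hx').mem_iff.1 ha) with rfl | h
      · exact hlt
      · exact hy a h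
    · have hxlty : x < y := lt_of_le_of_ne (not_lt.1 hlt) hxy
      simp only [insortUnique]
      rw [if_neg hlt, if_pos (Ne.symm hxy)]
      refine List.pairwise_cons.2 ⟨?_, hp⟩
      intro a ha
      rcases List.mem_cons.1 ha with rfl | ha
      · exact hxlty
      · exact lt_trans hxlty (hy a ha)

-- the bucket fact: inserting into the sorted list = sorting the set after adding
lemma insortUnique_srt {x : String} {s : List String} (hnd : s.Nodup) :
    insortUnique x (srt s) = srt (PySem.Set.add s x) := by
  have hperm : (srt s).Perm s := PySem.List.sorted_perm s (fun x => x) false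
  have hnd' : (srt s).Nodup := hperm.symm.nodup hnd
  have hple : (srt s).Pairwise (· ≤ ·) := PySem.List.sorted_pairwise s (fun x => x)
  have hplt : (srt s).Pairwise (· < ·) := by
    have := hple.and hnd'
    exact this.imp (fun h => lt_of_le_of_ne h.1 h.2)
  by_cases hm : x ∈ s
  · have hadd : PySem.Set.add s x = s := by simp [PySem.Set.add, hm]
    rw [hadd, insortUnique_of_mem hplt ((PySem.List.mem_sorted s _ false x).2 hm)]
  · have hadd : PySem.Set.add s x = s ++ [x] := by simp [PySem.Set.add, hm]
    have hm' : x ∉ srt s := fun h => hm ((PySem.List.mem_sorted s _ false x).1 h)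
    rw [hadd]
    refine (PySem.List.sorted_eq_of_perm_of_pairwise_lt (s ++ [x]) _ _ ?_ ?_).symm
    · exact ((insortUnique_perm_of_not_mem hm').trans ((hperm.cons x))).trans
        (List.perm_append_singleton x s).symm
    · exact insortUnique_pairwise_of_not_mem hplt hm'

-- loop invariant relating the two accumulator dicts
def DInv (d1 d2 : PySem.Dict String (List String)) : Prop :=
  d1.keys.Nodup ∧ (∀ p ∈ d1.items, p.2.Nodup) ∧
    d2.items = d1.items.map (fun p => (p.1, srt p.2))

lemma keys_eq_of_inv {d1 d2 : PySem.Dict String (List String)} (h : DInv d1 d2) :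
    d2.keys = d1.keys := by
  simp only [PySem.Dict.keys, h.2.2, List.map_map]
  rfl

lemma inv_step (d1 d2 : PySem.Dict String (List String)) (k q : String) (h : DInv d1 d2) :
    DInv (d1.insert k (PySem.Set.add (d1.getD k PySem.Set.empty) q))
        (d2.insert k (insortUnique q (d2.getD k []))) := by
  obtain ⟨hnd, hvals, hitems⟩ := h
  have hkeys : d2.keys = d1.keys := keys_eq_of_inv ⟨hnd, hvals, hitems⟩
  cases hc : d1.contains k with
  | false =>
    have hc2 : d2.contains k = false := by
      rw [← Bool.not_eq_true] at hc ⊢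
      rw [PySem.Dict.contains_iff_mem_keys] at hc ⊢
      rw [hkeys]; exact hc
    have hg1 : d1.getD k PySem.Set.empty = PySem.Set.empty :=
      PySem.Dict.getD_of_not_contains d1 _ hc
    have hg2 : d2.getD k [] = [] := PySem.Dict.getD_of_not_contains d2 _ hc2
    refine ⟨?_, ?_, ?_⟩
    · rw [PySem.Dict.keys_insert_of_not_contains d1 _ hc]
      have hk : k ∉ d1.keys := by
        intro hk
        rw [← PySem.Dict.contains_iff_mem_keys] at hk
        rw [hc] at hk; exact Bool.noConfusion hk
      exact hnd.append (List.nodup_singleton k) (by simpa [List.disjoint_singleton] using hk)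
    · rw [PySem.Dict.items_insert_of_not_contains d1 _ hc]
      intro p hp
      rcases List.mem_append.1 hp with hp | hp
      · exact hvals p hp
      · rw [List.mem_singleton.1 hp]
        exact PySem.Set.nodup_add _ _ (by rw [hg1]; exact List.nodup_nil)
    · rw [PySem.Dict.items_insert_of_not_contains d2 _ hc2,
        PySem.Dict.items_insert_of_not_contains d1 _ hc, List.map_append, hitems]
      rw [hg1, hg2]
      rfl
  | true =>
    have hc2 : d2.contains k = true := by
      rw [PySem.Dict.contains_iff_mem_keys] at hc ⊢
      rw [hkeys]; exact hc
    obtain ⟨v, hv⟩ : ∃ v, d1.get? k = some v := by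
      cases hg : d1.get? k with
      | none => rw [PySem.Dict.get?_eq_none_iff_contains] at hg; rw [hg] at hc; exact Bool.noConfusion hc
      | some v => exact ⟨v, rfl⟩
    have hmem : (k, v) ∈ d1.items := PySem.Dict.mem_items_of_get?_eq_some d1 hv
    have hvnd : v.Nodup := hvals _ hmem
    have hg1 : d1.getD k PySem.Set.empty = v := PySem.Dict.getD_of_mem_items d1 hmem hnd _
    have hmem2 : (k, srt v) ∈ d2.items := by
      rw [hitems]; exact List.mem_map.2 ⟨(k, v), hmem, rfl⟩
    have hnd2 : d2.keys.Nodup := hkeys ▸ hnd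
    have hg2 : d2.getD k [] = srt v := PySem.Dict.getD_of_mem_items d2 hmem2 hnd2 _
    refine ⟨?_, ?_, ?_⟩
    · rw [PySem.Dict.keys_insert_of_contains d1 _ hc]; exact hnd
    · rw [PySem.Dict.items_insert_of_contains d1 _ hc]
      intro p hp
      rcases List.mem_map.1 hp with ⟨a, ha, rfl⟩
      by_cases hak : (a.1 == k) = true
      · simp only [if_pos hak]
        exact PySem.Set.nodup_add _ _ (hg1 ▸ hvnd)
      · simp only [if_neg hak]
        exact hvals a ha
    · rw [PySem.Dict.items_insert_of_contains d2 _ hc2,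
        PySem.Dict.items_insert_of_contains d1 _ hc, hitems,
        List.map_map, List.map_map]
      refine List.map_congr_left ?_
      intro a _
      by_cases hak : (a.1 == k) = true
      · simp only [Function.comp, if_pos hak]
        rw [hg1, hg2, insortUnique_srt hvnd]
      · simp only [Function.comp, if_neg hak]
lemma fold_inv (l : List (List (String × String))) :
    ∀ (d1 d2 : PySem.Dict String (List String)), DInv d1 d2 →
    DInv (l.foldl (fun d f =>
          d.insert (dGet f "system")
            (PySem.Set.add (d.getD (dGet f "system") PySem.Set.empty) (dGet f "prn"))) d1)
        (l.foldl (fun d f =>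
          d.insert (dGet f "system")
            (insortUnique (dGet f "prn") (d.getD (dGet f "system") []))) d2) := by
  induction l with
  | nil => intro d1 d2 h; exact h
  | cons f fs ih =>
    intro d1 d2 h
    exact ih _ _ (inv_step d1 d2 (dGet f "system") (dGet f "prn") h)

lemma inv_empty : DInv PySem.Dict.empty PySem.Dict.empty := by
  refine ⟨PySem.Dict.nodup_keys_empty, ?_, ?_⟩ <;>
    simp [PySem.Dict.empty]

-- ===== VERDICT (by name: the statement is the Claim_ definition above) =====
theorem get_prns_by_system_spec : Claim_equal_get_prns_by_system := by
  intro files_info _ _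
  show get_prns_by_system files_info = get_prns_by_system_alt files_info
  exact (fold_inv files_info PySem.Dict.empty PySem.Dict.empty inv_empty).2.2.symm
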